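-- pv_equiv track=rewrite | github.com/CodeEventHorizon/ce151 | assignment1.py | fun_exercise_6
-- ===== SOURCE A (Python) =====
-- def fun_exercise_6(x):
--     a1="abcdefghijkl"
--     a2="mnopqrstuvwxyz"
--     for i in range(len(x)):
--         if x[i].lower() in a1:
--             x = x[:i] + x[i].lower() + x[i+1:]
--         elif x[i].lower() in a2:
--             x = x[:i] + x[i].upper() + x[i+1:]
--     y = x
--     return y
-- ===== SOURCE B (Python) =====
-- def fun_exercise_6(x):
--     a1 = "abcdefghijkl"
--     a2 = "mnopqrstuvwxyz"
--     out = []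
--     for c in x:
--         lc = c.lower()
--         if lc in a1:
--             out.append(lc)
--         elif lc in a2:
--             out.append(c.upper())
--         else:
--             out.append(c)
--     return ''.join(out)
-- ===== Notes on version B (the rewrite author's own statement) =====
-- stated objective: faster
-- what changed: Replaces the quadratic loop that rebuilds the whole string by slicing (x[:i] + ch + x[i+1:]) at every index with a single pass that collects the converted characters in a list and joins once.
import Mathlib
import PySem

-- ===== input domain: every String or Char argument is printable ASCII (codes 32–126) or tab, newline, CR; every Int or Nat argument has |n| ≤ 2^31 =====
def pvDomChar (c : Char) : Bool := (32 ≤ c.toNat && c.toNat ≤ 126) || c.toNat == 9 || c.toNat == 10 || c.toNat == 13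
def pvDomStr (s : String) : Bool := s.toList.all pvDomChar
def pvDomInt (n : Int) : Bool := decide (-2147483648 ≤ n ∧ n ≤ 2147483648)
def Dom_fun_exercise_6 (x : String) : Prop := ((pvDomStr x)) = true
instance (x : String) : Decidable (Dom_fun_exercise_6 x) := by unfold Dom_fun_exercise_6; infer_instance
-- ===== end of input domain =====

-- B replaces A's quadratic per-index string rebuild by slicing with one pass collecting
-- converted characters and a single join (objective: faster, asymptotic).

-- ===== PORT A =====
-- a1 / a2 from A's body
def pvA1 : List Char := "abcdefghijkl".toList
def pvA2 : List Char := "mnopqrstuvwxyz".toList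

-- one iteration of A's for-loop: x = x[:i] + x[i].lower()/upper() + x[i+1:]
def pvAStep (s : List Char) (i : Nat) : List Char :=
  match PySem.List.pyGet? s (i : Int) with
  | none => s      -- unreachable: i < len(s) throughout A's loop
  | some c =>
    let lc := PySem.Chars.lowerChar c
    if PySem.Chars.isIn [lc] pvA1 then
      PySem.List.slice s none (some (i : Int)) ++ [lc] ++ PySem.List.slice s (some ((i : Int) + 1)) none
    else if PySem.Chars.isIn [lc] pvA2 then
      PySem.List.slice s none (some (i : Int)) ++ [PySem.Chars.upperChar c] ++ PySem.List.slice s (some ((i : Int) + 1)) none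
    else s

def fun_exercise_6 (x : String) : String :=
  String.mk ((List.range x.toList.length).foldl pvAStep x.toList)

-- ===== PORT B =====
-- body of B's for-loop: the converted character appended to out
def pvBStep (c : Char) : Char :=
  let lc := PySem.Chars.lowerChar c
  if PySem.Chars.isIn [lc] pvA1 then lc
  else if PySem.Chars.isIn [lc] pvA2 then PySem.Chars.upperChar c
  else c

def fun_exercise_6_alt (x : String) : String :=
  String.mk (x.toList.foldl (fun out c => out ++ [pvBStep c]) [])

-- ===== PRECONDITION & SPEC =====
def Spec_fun_exercise_6 (x : String) (out : String) : Prop := out = fun_exercise_6_alt x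
instance (x : String) (out : String) : Decidable (Spec_fun_exercise_6 x out) := by unfold Spec_fun_exercise_6; infer_instance

-- ===== CLAIM (what is proved, stated in full; the proofs are below) =====
def Claim_equal_fun_exercise_6 : Prop := ∀ (x : String), Dom_fun_exercise_6 x → Spec_fun_exercise_6 x (fun_exercise_6 x)

-- ===== LEMMAS AND PROOFS =====

-- B's append loop is a map
lemma pvB_foldl (l acc : List Char) :
    l.foldl (fun out c => out ++ [pvBStep c]) acc = acc ++ l.map pvBStep := by
  induction l generalizing acc with
  | nil => simp
  | cons c rest ih => simp [List.foldl, ih]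

-- invariant of A's loop: the processed prefix is mapped, the rest untouched
lemma pvA_loop (todo done : List Char) :
    (List.range' done.length todo.length).foldl pvAStep (done ++ todo)
      = done ++ todo.map pvBStep := by
  induction todo generalizing done with
  | nil => simp
  | cons c rest ih =>
    simp only [List.length_cons]
    rw [List.range'_succ, List.foldl_cons]
    have hstep : pvAStep (done ++ c :: rest) done.length
        = (done ++ [pvBStep c]) ++ rest := by
      have hget : PySem.List.pyGet? (done ++ c :: rest) ((done.length : Nat) : Int)
          = some c := by
        simp
      have htake : PySem.List.slice (done ++ c :: rest) none (some ((done.length : Nat) : Int))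
          = done := by
        rw [PySem.List.slice_to_natCast]
        simp
      have hdrop : PySem.List.slice (done ++ c :: rest) (some (((done.length : Nat) : Int) + 1)) none
          = rest := by
        have : ((done.length : Nat) : Int) + 1 = (((done.length + 1 : Nat)) : Int) := by push_cast; ring
        rw [this, PySem.List.slice_from_natCast]
        have : done ++ c :: rest = (done ++ [c]) ++ rest := by simp
        rw [this]
        simpa using List.drop_left (done ++ [c]) rest
      simp only [pvAStep, hget, pvBStep]
      split_ifs <;> simp [htake, hdrop]
    rw [hstep]
    have := ih (done ++ [pvBStep c])
    simpa using this

-- ===== VERDICT (by name: the statement is the Claim_ definition above) =====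
theorem fun_exercise_6_spec : Claim_equal_fun_exercise_6 := by
  intro x _
  unfold Spec_fun_exercise_6 fun_exercise_6 fun_exercise_6_alt
  rw [pvB_foldl, List.range_eq_range']
  have h := pvA_loop x.toList []
  simp only [List.length_nil, List.nil_append] at h
  exact congrArg String.mk h
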